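-- pv_equiv track=rewrite | github.com/qingyunha/qmqtt | qmqtt/server.py | remaining_length_decode
-- ===== SOURCE A (Python) =====
-- def remaining_length_decode(x):
--     if len(x) >= 4:
--         raise ValueError('remaining length too large')
--     multiplier = 1
--     value = 0
--     for b in x:
--         value += (b & 127) * multiplier
--         multiplier *= 128
--     return value
-- ===== SOURCE B (Python) =====
-- def remaining_length_decode(x):
--     if len(x) >= 4:
--         raise ValueError('remaining length too large')
--     value = 0
--     for b in reversed(x):
--         value = value * 128 + (b & 127)
--     return value
-- ===== Notes on version B (the rewrite author's own statement) =====
-- stated objective: idiomatic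
-- what changed: Replaces the multiplier-accumulator loop (low-to-high with positional weights) by Horner's method over the bytes in reverse order, maintaining no running multiplier.
import Mathlib
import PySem

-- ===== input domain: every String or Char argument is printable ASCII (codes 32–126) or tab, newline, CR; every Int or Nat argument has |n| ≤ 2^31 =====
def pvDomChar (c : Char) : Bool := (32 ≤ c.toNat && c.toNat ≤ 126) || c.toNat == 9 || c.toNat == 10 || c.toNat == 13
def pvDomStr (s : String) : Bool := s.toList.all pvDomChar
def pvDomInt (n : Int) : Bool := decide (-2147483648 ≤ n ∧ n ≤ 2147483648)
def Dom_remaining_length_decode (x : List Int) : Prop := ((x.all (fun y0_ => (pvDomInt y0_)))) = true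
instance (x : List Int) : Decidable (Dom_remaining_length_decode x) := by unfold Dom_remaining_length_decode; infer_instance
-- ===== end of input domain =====

-- B rewrites the low-to-high multiplier-accumulator loop as Horner's method over the bytes in reverse order (idiomatic; no running multiplier).

-- ===== PORT A =====
-- A keeps (multiplier, value) state, visiting bytes low-to-high.
def remaining_length_decode (x : List Int) : Int :=
  (x.foldl (fun (s : Int × Int) b => (s.1 * 128, s.2 + (PySem.Int.band b 127) * s.1)) (1, 0)).2

-- ===== PORT B =====
-- B: Horner over the reversed list.
def remaining_length_decode_alt (x : List Int) : Int :=
  x.reverse.foldl (fun v b => v * 128 + (PySem.Int.band b 127)) 0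

-- ===== PRECONDITION & SPEC =====
-- A raises ValueError when len(x) >= 4; Pre_ excludes exactly those inputs.
def Pre_remaining_length_decode (x : List Int) : Prop := x.length < 4
instance (x : List Int) : Decidable (Pre_remaining_length_decode x) := by unfold Pre_remaining_length_decode; infer_instance
def pvWitness_remaining_length_decode : List Int := [193, 2]

def Spec_remaining_length_decode (x : List Int) (out : Int) : Prop := out = remaining_length_decode_alt x
instance (x : List Int) (out : Int) : Decidable (Spec_remaining_length_decode x out) := by unfold Spec_remaining_length_decode; infer_instance

-- ===== CLAIM (what is proved, stated in full; the proofs are below) =====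
def Claim_equal_remaining_length_decode : Prop := ∀ (x : List Int), Dom_remaining_length_decode x → Pre_remaining_length_decode x → Spec_remaining_length_decode x (remaining_length_decode x)

-- ===== LEMMAS AND PROOFS =====

-- ===== VERDICT (by name: the statement is the Claim_ definition above) =====
theorem remaining_length_decode_spec : Claim_equal_remaining_length_decode := by
  intro x _ hpre
  unfold Spec_remaining_length_decode
  match x with
  | [] => rfl
  | [a] =>
      simp [remaining_length_decode, remaining_length_decode_alt, List.foldl]
  | [a, b] =>
      simp [remaining_length_decode, remaining_length_decode_alt, List.foldl]
      ring
  | [a, b, c] =>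
      simp [remaining_length_decode, remaining_length_decode_alt, List.foldl]
      ring
  | _ :: _ :: _ :: _ :: _ =>
      exfalso
      simp [Pre_remaining_length_decode, List.length] at hpre
      omega
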